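-- pv_equiv track=rewrite | github.com/chaechae1212/coding-practice | 프로그래머스/0/120875. 평행/평행.py | solution
-- ===== SOURCE A (Python) =====
-- from math import gcd
--
-- def solution (dots):
--
-- 	save=[[0, 1, 2, 3] , [0, 2, 1, 3], [0, 3, 1, 2]]
--
-- 	for sav in save:
--
-- 		dx = dots[sav[1]][0]-dots[sav[0]][0]
-- 		dy=dots[sav[1]][1]-dots[sav[0]][1]
--
-- 		dx2=dots[sav[3]][0]-dots[sav[2]][0]
-- 		dy2=dots[sav[3]][1]-dots[sav[2]][1]
--
-- 		if (dx==0 and dy==0) or (dx2==0 and dy2==0):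
-- 				return 1
--
-- 		f=gcd(dx, dy)
-- 		s=gcd(dx2, dy2)
--
-- 		dx=dx//f
-- 		dy=dy//f
--
-- 		dx2=dx2//s
-- 		dy2=dy2//s
--
--
-- 		if (dx == dx2 and dy == dy2) or (dx == -dx2 and dy == -dy2):
-- 				return 1
--
-- 	return 0
-- ===== SOURCE B (Python) =====
-- def solution(dots):
--     (x0, y0), (x1, y1), (x2, y2), (x3, y3) = ((p[0], p[1]) for p in dots[:4])
--
--     def area2(px, py, qx, qy):
--         # twice the signed area of the triangle (p0, p, q)
--         return (px - x0) * (qy - y0) - (py - y0) * (qx - x0)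
--
--     a = area2(x1, y1, x2, y2)
--     b = area2(x1, y1, x3, y3)
--     c = area2(x2, y2, x3, y3)
--     # same base p0p1: p2p3 parallel to it iff equal areas (a == b);
--     # base p0p3: p1p2 parallel iff b == c; base p0p2: p1p3 parallel iff a + c == 0.
--     return 1 if a == b or b == c or a + c == 0 else 0
-- ===== Notes on version B (the rewrite author's own statement) =====
-- stated objective: alternative
-- what changed: Drops the loop over pairings with gcd-normalized direction comparison; instead computes three signed triangle areas anchored at the first point and tests three linear equalities among them (equal areas over a common base characterize parallelism).
import Mathlib
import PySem

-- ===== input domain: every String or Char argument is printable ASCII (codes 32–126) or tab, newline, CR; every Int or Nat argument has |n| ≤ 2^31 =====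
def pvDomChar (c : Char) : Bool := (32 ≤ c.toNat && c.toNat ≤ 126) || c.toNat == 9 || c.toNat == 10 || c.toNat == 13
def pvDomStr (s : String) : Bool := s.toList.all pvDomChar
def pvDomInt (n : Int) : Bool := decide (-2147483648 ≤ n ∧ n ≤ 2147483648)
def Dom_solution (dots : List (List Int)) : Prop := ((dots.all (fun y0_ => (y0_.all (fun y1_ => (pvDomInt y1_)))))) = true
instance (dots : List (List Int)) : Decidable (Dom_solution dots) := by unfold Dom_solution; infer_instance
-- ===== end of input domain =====

-- B replaces A's pairing loop with gcd-normalised direction tests by three signed triangle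
-- areas anchored at the first point and three linear equalities among them; objective: alternative.

-- ===== PORT A =====
-- xs[i] with Python semantics; the getD default is unreachable inside Pre_solution (out of range = IndexError, excluded).
def pvIdx (l : List Int) (i : Int) : Int := (PySem.List.pyGet? l i).getD 0
def pvPt (dots : List (List Int)) (i j : Int) : Int := pvIdx ((PySem.List.pyGet? dots i).getD []) j

-- the 'for sav in save' loop with its early returns
def pvLoopA (dots : List (List Int)) : List (List Int) → Int
  | [] => 0
  | sav :: rest =>
    let dx := pvPt dots (pvIdx sav 1) 0 - pvPt dots (pvIdx sav 0) 0
    let dy := pvPt dots (pvIdx sav 1) 1 - pvPt dots (pvIdx sav 0) 1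
    let dx2 := pvPt dots (pvIdx sav 3) 0 - pvPt dots (pvIdx sav 2) 0
    let dy2 := pvPt dots (pvIdx sav 3) 1 - pvPt dots (pvIdx sav 2) 1
    if (dx = 0 ∧ dy = 0) ∨ (dx2 = 0 ∧ dy2 = 0) then 1
    else
      let f : Int := Int.gcd dx dy
      let s : Int := Int.gcd dx2 dy2
      let dx' := PySem.Int.floordiv dx f
      let dy' := PySem.Int.floordiv dy f
      let dx2' := PySem.Int.floordiv dx2 s
      let dy2' := PySem.Int.floordiv dy2 s
      if (dx' = dx2' ∧ dy' = dy2') ∨ (dx' = -dx2' ∧ dy' = -dy2') then 1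
      else pvLoopA dots rest

def solution (dots : List (List Int)) : Int :=
  pvLoopA dots [[0, 1, 2, 3], [0, 2, 1, 3], [0, 3, 1, 2]]

-- ===== PORT B =====
-- Source B's helper 'area2': twice the signed area of the triangle (p0, p, q)
def pvArea2 (x0 y0 px py qx qy : Int) : Int := (px - x0) * (qy - y0) - (py - y0) * (qx - x0)

def solution_alt (dots : List (List Int)) : Int :=
  match PySem.List.slice dots (some 0) (some 4) with
  | [p0, p1, p2, p3] =>
    let x0 := pvIdx p0 0; let y0 := pvIdx p0 1
    let x1 := pvIdx p1 0; let y1 := pvIdx p1 1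
    let x2 := pvIdx p2 0; let y2 := pvIdx p2 1
    let x3 := pvIdx p3 0; let y3 := pvIdx p3 1
    let a := pvArea2 x0 y0 x1 y1 x2 y2
    let b := pvArea2 x0 y0 x1 y1 x3 y3
    let c := pvArea2 x0 y0 x2 y2 x3 y3
    if a = b ∨ b = c ∨ a + c = 0 then 1 else 0
  | _ => 0  -- Python B raises ValueError here; outside Pre_solution

-- ===== PRECONDITION & SPEC =====
-- Pre_ excludes exactly the inputs on which A raises IndexError: fewer than 4 points, or one
-- of the first 4 points with fewer than 2 coordinates.
def Pre_solution (dots : List (List Int)) : Prop :=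
  4 ≤ dots.length ∧ ∀ p ∈ dots.take 4, 2 ≤ p.length
instance (dots : List (List Int)) : Decidable (Pre_solution dots) := by unfold Pre_solution; infer_instance
def pvWitness_solution : List (List Int) := [[0, 0], [2, 0], [3, 1], [1, 1]]

def Spec_solution (dots : List (List Int)) (out : Int) : Prop := out = solution_alt dots
instance (dots : List (List Int)) (out : Int) : Decidable (Spec_solution dots out) := by unfold Spec_solution; infer_instance

-- ===== CLAIM (what is proved, stated in full; the proofs are below) =====
def Claim_equal_solution : Prop := ∀ (dots : List (List Int)), Dom_solution dots → Pre_solution dots → Spec_solution dots (solution dots)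

-- ===== LEMMAS AND PROOFS =====

-- two coprime integer vectors are equal up to sign iff their cross product vanishes
theorem pvPrim (a b c d : Int) (hab : Int.gcd a b = 1) (hcd : Int.gcd c d = 1)
    (h : a * d = b * c) : (a = c ∧ b = d) ∨ (a = -c ∧ b = -d) := by
  have hco : IsCoprime a b := Int.isCoprime_iff_gcd_eq_one.2 hab
  have hco2 : IsCoprime c d := Int.isCoprime_iff_gcd_eq_one.2 hcd
  have hac : a ∣ c := hco.dvd_of_dvd_mul_right ⟨d, by linarith⟩
  have hca : c ∣ a := hco2.dvd_of_dvd_mul_right ⟨b, by linarith⟩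
  have hec : a = c ∨ a = -c := Int.associated_iff.1 (associated_of_dvd_dvd hac hca)
  by_cases hc : c = 0
  · have hb1 : b.natAbs = 1 := by subst hc; rcases hec with h' | h' <;> simp [h'] at hab ⊢ <;> omega
    have hd1 : d.natAbs = 1 := by subst hc; simpa using hcd
    omega
  · rcases hec with h' | h'
    · refine Or.inl ⟨h', ?_⟩
      have hcb : c * d = c * b := by linear_combination h - d * h'
      have := mul_left_cancel₀ hc hcb
      omega
    · refine Or.inr ⟨h', ?_⟩
      have hcb : c * (-d) = c * b := by linear_combination h - d * h'
      have := mul_left_cancel₀ hc hcb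
      omega

-- A's per-pairing test (guard ∨ gcd-normalised comparison) is exactly 'cross product zero'
theorem pvChkIff (a b c d : Int) :
    (((a = 0 ∧ b = 0) ∨ (c = 0 ∧ d = 0)) ∨
      (¬ ((a = 0 ∧ b = 0) ∨ (c = 0 ∧ d = 0)) ∧
        ((PySem.Int.floordiv a (Int.gcd a b) = PySem.Int.floordiv c (Int.gcd c d) ∧
          PySem.Int.floordiv b (Int.gcd a b) = PySem.Int.floordiv d (Int.gcd c d)) ∨
         (PySem.Int.floordiv a (Int.gcd a b) = -PySem.Int.floordiv c (Int.gcd c d) ∧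
          PySem.Int.floordiv b (Int.gcd a b) = -PySem.Int.floordiv d (Int.gcd c d)))))
    ↔ a * d - b * c = 0 := by
  by_cases hz : (a = 0 ∧ b = 0) ∨ (c = 0 ∧ d = 0)
  · constructor
    · intro _
      rcases hz with ⟨h1, h2⟩ | ⟨h1, h2⟩ <;> subst h1 <;> subst h2 <;> ring
    · intro _; exact Or.inl hz
  · have hfpos : 0 < Int.gcd a b := Int.gcd_pos_iff.2 (by tauto)
    have hspos : 0 < Int.gcd c d := Int.gcd_pos_iff.2 (by tauto)
    have hfpos' : (0 : Int) < (Int.gcd a b : Int) := by exact_mod_cast hfpos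
    have hspos' : (0 : Int) < (Int.gcd c d : Int) := by exact_mod_cast hspos
    rw [PySem.Int.floordiv_eq_ediv_of_pos hfpos', PySem.Int.floordiv_eq_ediv_of_pos hfpos',
        PySem.Int.floordiv_eq_ediv_of_pos hspos', PySem.Int.floordiv_eq_ediv_of_pos hspos']
    set f : Int := (Int.gcd a b : Int) with hf
    set s : Int := (Int.gcd c d : Int) with hs
    have ha : a / f * f = a := Int.ediv_mul_cancel (hf ▸ Int.gcd_dvd_left a b)
    have hb : b / f * f = b := Int.ediv_mul_cancel (hf ▸ Int.gcd_dvd_right a b)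
    have hc : c / s * s = c := Int.ediv_mul_cancel (hs ▸ Int.gcd_dvd_left c d)
    have hd : d / s * s = d := Int.ediv_mul_cancel (hs ▸ Int.gcd_dvd_right c d)
    have hg1 : Int.gcd (a / f) (b / f) = 1 := Int.gcd_div_gcd_div_gcd hfpos
    have hg2 : Int.gcd (c / s) (d / s) = 1 := Int.gcd_div_gcd_div_gcd hspos
    constructor
    · rintro (h | ⟨-, ⟨h1, h2⟩ | ⟨h1, h2⟩⟩)
      · exact absurd h hz
      · rw [← ha, ← hb, ← hc, ← hd, h1, h2]; ring
      · rw [← ha, ← hb, ← hc, ← hd, h1, h2]; ring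
    · intro h
      refine Or.inr ⟨hz, ?_⟩
      have hcross : (a / f) * (d / s) = (b / f) * (c / s) := by
        have hfs : f * s ≠ 0 := by positivity
        apply mul_left_cancel₀ hfs
        have : a * d = b * c := by linarith
        calc f * s * (a / f * (d / s)) = (a / f * f) * (d / s * s) := by ring
          _ = a * d := by rw [ha, hd]
          _ = b * c := this
          _ = (b / f * f) * (c / s * s) := by rw [hb, hc]
          _ = f * s * (b / f * (c / s)) := by ring
      exact pvPrim _ _ _ _ hg1 hg2 hcross

-- one pairing step of A's loop collapses to a cross-product test
theorem pvStep (a b c d rest : Int) :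
    (if (a = 0 ∧ b = 0) ∨ (c = 0 ∧ d = 0) then (1 : Int)
     else if (PySem.Int.floordiv a (Int.gcd a b) = PySem.Int.floordiv c (Int.gcd c d) ∧
              PySem.Int.floordiv b (Int.gcd a b) = PySem.Int.floordiv d (Int.gcd c d)) ∨
             (PySem.Int.floordiv a (Int.gcd a b) = -PySem.Int.floordiv c (Int.gcd c d) ∧
              PySem.Int.floordiv b (Int.gcd a b) = -PySem.Int.floordiv d (Int.gcd c d)) then 1
     else rest)
    = if a * d - b * c = 0 then 1 else rest := by
  have h := pvChkIff a b c d
  split_ifs with h1 h2 h3 h4 h5 <;> first | rfl | (exfalso; tauto)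

-- the three cross tests are the three area equalities (d = b−a, e = a+c, f = b−c by ring)
theorem pvFinal (a b c d e f : Int) (h1 : d = b - a) (h2 : e = a + c) (h3 : f = b - c) :
    (if d = 0 then (1 : Int) else if e = 0 then 1 else if f = 0 then 1 else 0)
    = if a = b ∨ b = c ∨ a + c = 0 then 1 else 0 := by
  subst h1; subst h2; subst h3; split_ifs <;> omega

-- small-index evaluation lemmas for the ports' list accesses
theorem pvIdx_cn (l : List Int) (n : Nat) : pvIdx l (n : Int) = (l[n]?).getD 0 := by
  rw [pvIdx, PySem.List.pyGet?_natCast]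
theorem pvPt_cn (dots : List (List Int)) (n : Nat) (j : Int) :
    pvPt dots (n : Int) j = pvIdx ((dots[n]?).getD []) j := by
  rw [pvPt, PySem.List.pyGet?_natCast]
theorem pvIdx_c0 (x : Int) (l : List Int) : pvIdx (x :: l) 0 = x := by
  simpa using pvIdx_cn (x :: l) 0
theorem pvIdx_c1 (x y : Int) (l : List Int) : pvIdx (x :: y :: l) 1 = y := by
  simpa using pvIdx_cn (x :: y :: l) 1
theorem pvIdx_l2 (a b c d : Int) : pvIdx [a, b, c, d] 2 = c := by
  simpa using pvIdx_cn [a, b, c, d] 2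
theorem pvIdx_l3 (a b c d : Int) : pvIdx [a, b, c, d] 3 = d := by
  simpa using pvIdx_cn [a, b, c, d] 3
theorem pvPt_0 (p : List Int) (r : List (List Int)) (j : Int) : pvPt (p :: r) 0 j = pvIdx p j := by
  simpa using pvPt_cn (p :: r) 0 j
theorem pvPt_1 (p0 p1 : List Int) (r : List (List Int)) (j : Int) :
    pvPt (p0 :: p1 :: r) 1 j = pvIdx p1 j := by
  simpa using pvPt_cn (p0 :: p1 :: r) 1 j
theorem pvPt_2 (p0 p1 p2 : List Int) (r : List (List Int)) (j : Int) :
    pvPt (p0 :: p1 :: p2 :: r) 2 j = pvIdx p2 j := by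
  simpa using pvPt_cn (p0 :: p1 :: p2 :: r) 2 j
theorem pvPt_3 (p0 p1 p2 p3 : List Int) (r : List (List Int)) (j : Int) :
    pvPt (p0 :: p1 :: p2 :: p3 :: r) 3 j = pvIdx p3 j := by
  simpa using pvPt_cn (p0 :: p1 :: p2 :: p3 :: r) 3 j

-- ===== VERDICT (by name: the statement is the Claim_ definition above) =====
theorem solution_spec : Claim_equal_solution := by
  intro dots _ hpre
  obtain ⟨hlen, htake⟩ := hpre
  match dots, hlen with
  | p0 :: p1 :: p2 :: p3 :: r, _ =>
    have h0 : 2 ≤ p0.length := htake p0 (by simp [List.take])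
    have h1 : 2 ≤ p1.length := htake p1 (by simp [List.take])
    have h2 : 2 ≤ p2.length := htake p2 (by simp [List.take])
    have h3 : 2 ≤ p3.length := htake p3 (by simp [List.take])
    match p0, h0 with
    | x0 :: y0 :: r0, _ =>
    match p1, h1 with
    | x1 :: y1 :: r1, _ =>
    match p2, h2 with
    | x2 :: y2 :: r2, _ =>
    match p3, h3 with
    | x3 :: y3 :: r3, _ =>
      show solution _ = solution_alt _
      have hslice : PySem.List.slice ((x0 :: y0 :: r0) :: (x1 :: y1 :: r1) :: (x2 :: y2 :: r2) :: (x3 :: y3 :: r3) :: r)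
          (some 0) (some 4) = [x0 :: y0 :: r0, x1 :: y1 :: r1, x2 :: y2 :: r2, x3 :: y3 :: r3] := by
        have := PySem.List.slice_natCast ((x0 :: y0 :: r0) :: (x1 :: y1 :: r1) :: (x2 :: y2 :: r2) :: (x3 :: y3 :: r3) :: r) 0 4
        simpa using this
      rw [solution, solution_alt, hslice]
      simp only [pvLoopA, pvIdx_l2, pvIdx_l3,
        pvPt_0, pvPt_1, pvPt_2, pvPt_3, pvIdx_c0, pvIdx_c1, pvArea2]
      rw [pvStep, pvStep, pvStep]
      exact pvFinal _ _ _ _ _ _ (by ring) (by ring) (by ring)
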